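-- pv_equiv track=rewrite | github.com/comsterfpv/hello-python | app/main.py | check_guess
-- ===== SOURCE A (Python) =====
-- from collections import Counter
--
-- def check_guess(answer, guess):
--     freq = Counter([a for a, g in zip(answer, guess) if a != g])
--     ret = []
--     for a, g in zip(answer, guess):
--         if a == g:
--             ret.append(2)
--         elif g in freq and freq[g] > 0:
--             freq[g] -= 1
--             ret.append(1)
--         else:
--             ret.append(0)
--     return ret
-- ===== SOURCE B (Python) =====
-- def check_guess(answer, guess):
--     pairs = list(zip(answer, guess))
--     res = []
--     for i, (a, g) in enumerate(pairs):
--         if a == g: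
--             res.append(2)
--         elif sum(1 for x, y in pairs[:i] if x != y and y == g) \
--                 < sum(1 for x, y in pairs if x != y and x == g):
--             res.append(1)
--         else:
--             res.append(0)
--     return res
-- ===== Notes on version B (the rewrite author's own statement) =====
-- stated objective: alternative
-- what changed: Replaces A's mutable Counter consumed while scanning with a stateless closed-form per-position rule: a non-green cell is yellow iff the number of earlier non-green cells with the same guess letter is below the number of mismatched answer occurrences of that letter.
import Mathlib
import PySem

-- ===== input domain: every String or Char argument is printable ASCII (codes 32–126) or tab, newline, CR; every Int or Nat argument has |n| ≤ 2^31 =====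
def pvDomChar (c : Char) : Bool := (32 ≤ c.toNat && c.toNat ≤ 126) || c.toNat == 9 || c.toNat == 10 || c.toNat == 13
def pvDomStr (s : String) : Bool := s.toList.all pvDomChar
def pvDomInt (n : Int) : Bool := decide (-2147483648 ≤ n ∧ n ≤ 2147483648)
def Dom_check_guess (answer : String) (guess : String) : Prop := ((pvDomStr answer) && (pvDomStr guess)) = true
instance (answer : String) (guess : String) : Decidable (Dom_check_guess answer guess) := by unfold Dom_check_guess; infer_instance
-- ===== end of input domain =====

-- B replaces A's mutable Counter with a closed-form per-position count: a non-green cell is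
-- yellow iff fewer earlier non-green cells used its guess letter than mismatched answer
-- occurrences provide (objective: alternative algorithm, no mutable state).


-- ===== PORT A =====
def check_guess (answer : String) (guess : String) : List Int :=
  let pairs := List.zip answer.toList guess.toList
  -- freq = Counter([a for a, g in zip(answer, guess) if a != g])
  let freq : PySem.Dict Char Int :=
    PySem.Dict.counter ((pairs.filter (fun p => p.1 ≠ p.2)).map (fun p => p.1))
  (pairs.foldl
    (fun (s : PySem.Dict Char Int × List Int) p =>
      if p.1 = p.2 then (s.1, s.2 ++ [(2 : Int)])
      else if s.1.contains p.2 = true ∧ 0 < s.1.getD p.2 0 then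
        (s.1.insert p.2 (s.1.getD p.2 0 - 1), s.2 ++ [(1 : Int)])
      else (s.1, s.2 ++ [(0 : Int)]))
    (freq, ([] : List Int))).2

-- ===== PORT B =====
def check_guess_alt (answer : String) (guess : String) : List Int :=
  let pairs := List.zip answer.toList guess.toList
  (PySem.List.enumerate pairs 0).foldl
    (fun (res : List Int) ip =>
      if ip.2.1 = ip.2.2 then res ++ [(2 : Int)]
      else if ((pairs.take ip.1.toNat).countP
                  (fun q => decide (q.1 ≠ q.2 ∧ q.2 = ip.2.2)) : Int)
                < (pairs.countP (fun q => decide (q.1 ≠ q.2 ∧ q.1 = ip.2.2)) : Int)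
      then res ++ [(1 : Int)] else res ++ [(0 : Int)]) []

-- ===== PRECONDITION & SPEC =====
def Spec_check_guess (answer : String) (guess : String) (out : List Int) : Prop := out = check_guess_alt answer guess
instance (answer : String) (guess : String) (out : List Int) : Decidable (Spec_check_guess answer guess out) := by unfold Spec_check_guess; infer_instance

-- ===== CLAIM (what is proved, stated in full; the proofs are below) =====
def Claim_equal_check_guess : Prop := ∀ (answer : String) (guess : String), Dom_check_guess answer guess → Spec_check_guess answer guess (check_guess answer guess)

-- ===== LEMMAS AND PROOFS =====

-- # of earlier non-green positions that want letter g
def pvNG (l : List (Char × Char)) (g : Char) : Nat :=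
  l.countP (fun q => decide (q.1 ≠ q.2 ∧ q.2 = g))

-- # of mismatched answer occurrences of g in the whole zipped list
def pvAV (P : List (Char × Char)) (g : Char) : Nat :=
  P.countP (fun q => decide (q.1 ≠ q.2 ∧ q.1 = g))

-- reference recursion both ports are reduced to
def pvGo (P pre rest : List (Char × Char)) (acc : List Int) : List Int :=
  match rest with
  | [] => acc
  | p :: rest' =>
      pvGo P (pre ++ [p]) rest'
        (acc ++ [if p.1 = p.2 then (2 : Int)
                 else if (pvNG pre p.2 : Int) < (pvAV P p.2 : Int) then 1 else 0])

def pvStepA (s : PySem.Dict Char Int × List Int) (p : Char × Char) :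
    PySem.Dict Char Int × List Int :=
  if p.1 = p.2 then (s.1, s.2 ++ [(2 : Int)])
  else if s.1.contains p.2 = true ∧ 0 < s.1.getD p.2 0 then
    (s.1.insert p.2 (s.1.getD p.2 0 - 1), s.2 ++ [(1 : Int)])
  else (s.1, s.2 ++ [(0 : Int)])

lemma pvNG_append_singleton (l : List (Char × Char)) (p : Char × Char) (g : Char) :
    pvNG (l ++ [p]) g = pvNG l g + (if p.1 ≠ p.2 ∧ p.2 = g then 1 else 0) := by
  by_cases h : p.1 ≠ p.2 ∧ p.2 = g <;>
    simp [pvNG, List.countP_append, List.countP_cons, h]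

lemma pvA_loop (P : List (Char × Char)) :
    ∀ (rest pre : List (Char × Char)) (freq : PySem.Dict Char Int) (acc : List Int),
    (∀ c, freq.getD c 0 = max ((pvAV P c : Int) - (pvNG pre c : Int)) 0) →
    (rest.foldl pvStepA (freq, acc)).2 = pvGo P pre rest acc := by
  intro rest
  induction rest with
  | nil => intro pre freq acc _; rfl
  | cons p rest' ih =>
    intro pre freq acc hinv
    obtain ⟨a, g⟩ := p
    simp only [List.foldl_cons, pvGo]
    by_cases hag : a = g
    · rw [show pvStepA (freq, acc) (a, g) = (freq, acc ++ [(2:Int)]) by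
        simp [pvStepA, hag]]
      rw [if_pos hag]
      apply ih
      intro c
      simp [pvNG_append_singleton, hinv c, hag]
    · have hg := hinv g
      by_cases hcond : freq.contains g = true ∧ 0 < freq.getD g 0
      · -- yellow branch
        have hpos : (0:Int) < (pvAV P g : Int) - (pvNG pre g : Int) := by
          rcases hcond with ⟨-, h2⟩; rw [hg] at h2; omega
        rw [show pvStepA (freq, acc) (a, g)
              = (freq.insert g (freq.getD g 0 - 1), acc ++ [(1:Int)]) by
          simp [pvStepA, hag, hcond]]
        rw [if_neg hag, if_pos (by exact_mod_cast (by omega : (pvNG pre g : Int) < (pvAV P g : Int)))]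
        apply ih
        intro c
        rw [PySem.Dict.getD_insert, pvNG_append_singleton]
        by_cases hc : c = g
        · subst hc
          rw [if_pos rfl, hg, if_pos ⟨hag, rfl⟩]
          push_cast
          omega
        · rw [if_neg hc, hinv c, if_neg (by intro h; exact hc (h.2.symm))]
          simp
      · -- gray branch
        have hz : freq.getD g 0 = 0 := by
          by_cases hcont : freq.contains g = true
          · have : ¬ (0 < freq.getD g 0) := fun h => hcond ⟨hcont, h⟩
            rw [hg] at this ⊢
            omega
          · exact PySem.Dict.getD_of_not_contains _ _ (by simpa using hcont)
        have hge : (pvAV P g : Int) ≤ (pvNG pre g : Int) := by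
          rw [hg] at hz; omega
        rw [show pvStepA (freq, acc) (a, g) = (freq, acc ++ [(0:Int)]) by
          simp [pvStepA, hag, hcond]]
        rw [if_neg hag, if_neg (by omega)]
        apply ih
        intro c
        rw [hinv c, pvNG_append_singleton]
        by_cases hc : c = g
        · subst hc
          rw [if_pos ⟨hag, rfl⟩, hg] at *
          push_cast
          omega
        · rw [if_neg (by intro h; exact hc (h.2.symm))]
          simp

lemma pvB_loop (P : List (Char × Char)) :
    ∀ (rest pre : List (Char × Char)) (acc : List Int), pre ++ rest = P →
    ((PySem.List.enumerate rest (pre.length : Int)).foldl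
      (fun (res : List Int) ip =>
        if ip.2.1 = ip.2.2 then res ++ [(2 : Int)]
        else if ((P.take ip.1.toNat).countP
                    (fun q => decide (q.1 ≠ q.2 ∧ q.2 = ip.2.2)) : Int)
                  < (P.countP (fun q => decide (q.1 ≠ q.2 ∧ q.1 = ip.2.2)) : Int)
        then res ++ [(1 : Int)] else res ++ [(0 : Int)]) acc)
      = pvGo P pre rest acc := by
  intro rest
  induction rest with
  | nil => intro pre acc _; rfl
  | cons p rest' ih =>
    intro pre acc hP
    have htake : P.take ((pre.length : Int)).toNat = pre := by
      rw [Int.toNat_natCast, ← hP, List.take_left]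
    simp only [PySem.List.enumerate_cons, List.foldl_cons, pvGo]
    rw [htake]
    have hstep : (if p.1 = p.2 then acc ++ [(2 : Int)]
        else if ((pre.countP fun q => decide (q.1 ≠ q.2 ∧ q.2 = p.2) : Nat) : Int)
              < ((P.countP fun q => decide (q.1 ≠ q.2 ∧ q.1 = p.2) : Nat) : Int)
        then acc ++ [(1 : Int)] else acc ++ [(0 : Int)])
        = acc ++ [if p.1 = p.2 then (2 : Int)
                  else if (pvNG pre p.2 : Int) < (pvAV P p.2 : Int) then 1 else 0] := by
      simp only [pvNG, pvAV]
      split_ifs <;> rfl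
    rw [hstep]
    have hlen : ((pre.length : Int) + 1) = (((pre ++ [p]).length : Nat) : Int) := by
      simp
    rw [hlen]
    exact ih (pre ++ [p]) _ (by simpa using hP)

lemma pvInit_inv (P : List (Char × Char)) (c : Char) :
    (PySem.Dict.counter ((P.filter (fun p => p.1 ≠ p.2)).map (fun p => p.1))).getD c 0
      = max ((pvAV P c : Int) - (pvNG ([] : List (Char × Char)) c : Int)) 0 := by
  rw [PySem.Dict.getD_counter]
  have : ((P.filter (fun p => p.1 ≠ p.2)).map (fun p => p.1)).count c = pvAV P c := by
    rw [List.count_eq_countP, List.countP_map, pvAV]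
    rw [List.countP_filter]
    apply List.countP_congr
    intro q _
    by_cases h1 : q.1 = q.2 <;> by_cases h2 : q.1 = c <;> simp [h1, h2]
  rw [this]
  simp [pvNG]

-- ===== VERDICT (by name: the statement is the Claim_ definition above) =====
theorem check_guess_spec : Claim_equal_check_guess := by
  intro answer guess _
  unfold Spec_check_guess
  have hA := pvA_loop (List.zip answer.toList guess.toList)
      (List.zip answer.toList guess.toList) []
      (PySem.Dict.counter
        (((List.zip answer.toList guess.toList).filter (fun p => p.1 ≠ p.2)).map (fun p => p.1)))
      [] (fun c => pvInit_inv (List.zip answer.toList guess.toList) c)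
  have hB := pvB_loop (List.zip answer.toList guess.toList)
      (List.zip answer.toList guess.toList) [] [] rfl
  exact hA.trans hB.symm
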